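-- pv_equiv track=rewrite | github.com/Algreion/py-projects | advent-calendar2024.py | d25_parse
-- ===== SOURCE A (Python) =====
-- def d25_parse(input: str) -> tuple:
--     keys, locks = {}, {}
--     input = [item.splitlines() for item in input.split("\n\n")]
--     h = len(input[0])-1
--     for item in input:
--         lock = "#" in item[0]
--         heights = {}
--         for i,line in enumerate(item):
--             for j, c in enumerate(line):
--                 if lock and c != "#" and j not in heights: heights[j] = i-1
--                 elif not lock and c == "#" and j not in heights: heights[j] = h-i
--         heights = tuple(v for _,v in sorted(heights.items()))
--         group = locks if lock else keys
--         group[heights] = group.get(heights, 0) + 1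
--     return (keys, locks, h)
-- ===== SOURCE B (Python) =====
-- def d25_parse(input: str) -> tuple:
--     keys, locks = {}, {}
--     blocks = [b.splitlines() for b in input.split("\n\n")]
--     h = len(blocks[0]) - 1
--     for item in blocks:
--         lock = "#" in item[0]
--         width = max((len(line) for line in item), default=0)
--         heights = []
--         for j in range(width):
--             for i, line in enumerate(item):
--                 if j < len(line) and ((line[j] != "#") if lock else (line[j] == "#")):
--                     heights.append(i - 1 if lock else h - i)
--                     break
--         t = tuple(heights)
--         group = locks if lock else keys
--         group[t] = group.get(t, 0) + 1
--     return (keys, locks, h)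
-- ===== Notes on version B (the rewrite author's own statement) =====
-- stated objective: alternative
-- what changed: Per block, replaces A's row-major character scan guarded by a first-insertion dict (then sorted by key) with a column-major scan that finds, for each column in ascending order, the first row hitting the boundary condition and appends it directly to a list, so the heights dict and the sort disappear.
-- outside the precondition, e.g. on d25_parse('\n\n'): A raises IndexError, B raises IndexError
import Mathlib
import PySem

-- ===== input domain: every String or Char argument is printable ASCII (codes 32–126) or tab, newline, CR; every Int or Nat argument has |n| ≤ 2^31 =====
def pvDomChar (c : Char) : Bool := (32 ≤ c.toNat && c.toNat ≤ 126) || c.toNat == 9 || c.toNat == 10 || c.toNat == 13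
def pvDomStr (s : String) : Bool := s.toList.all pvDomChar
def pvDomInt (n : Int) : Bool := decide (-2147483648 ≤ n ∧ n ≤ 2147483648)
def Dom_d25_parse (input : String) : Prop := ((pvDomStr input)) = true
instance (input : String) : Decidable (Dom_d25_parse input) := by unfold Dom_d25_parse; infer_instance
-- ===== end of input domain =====

-- B replaces A's row-major scan guarded by a first-insertion dict (that is then sorted by key)
-- with a column-major scan emitting each column's first boundary row directly in ascending order;
-- the RETURN values are proved equal on every input where the Python A returns.

-- ===== PORT A =====
-- the blocks both Pythons compute identically: input.split("\n\n") mapped through splitlines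
def pvBlocks (input : String) : List (List String) :=
  ((PySem.Str.split? input "\n\n").getD []).map PySem.Str.splitlines

-- one character step of A's inner loop: row i, pair p = (j, c)
def d25A_step (lock : Bool) (h : Int) (i : Int) (d : PySem.Dict Int Int) (p : Int × Char) :
    PySem.Dict Int Int :=
  if lock = true ∧ p.2 ≠ '#' ∧ d.contains p.1 = false then d.insert p.1 (i - 1)
  else if lock = false ∧ p.2 = '#' ∧ d.contains p.1 = false then d.insert p.1 (h - i)
  else d

-- A's heights dict for one block
def d25A_heights (lock : Bool) (h : Int) (item : List String) : PySem.Dict Int Int :=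
  (PySem.List.enumerate item).foldl
    (fun d q => (PySem.List.enumerate q.2.toList).foldl (d25A_step lock h q.1) d)
    PySem.Dict.empty

-- tuple(v for _,v in sorted(heights.items()))
def d25A_tuple (lock : Bool) (h : Int) (item : List String) : List Int :=
  (PySem.List.sorted2 (d25A_heights lock h item).items Prod.fst Prod.snd).map Prod.snd

def d25_parse (input : String) : (List (List Int × Int)) × (List (List Int × Int)) × Int :=
  let blocks := pvBlocks input
  let h : Int := ((blocks.headD []).length : Int) - 1
  let kl :=
    blocks.foldl
      (fun (kl : PySem.Dict (List Int) Int × PySem.Dict (List Int) Int) item =>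
        let lock := PySem.Str.isIn "#" (item.headD "")   -- item[0]; Pre_ excludes item = []
        let hs := d25A_tuple lock h item
        if lock then (kl.1, kl.2.insert hs (kl.2.getD hs 0 + 1))
        else (kl.1.insert hs (kl.1.getD hs 0 + 1), kl.2))
      (PySem.Dict.empty, PySem.Dict.empty)
  (kl.1.items, kl.2.items, h)

-- ===== PORT B =====
-- B's inner loop for one column j: first row i whose char at j meets the boundary condition
def d25B_col (lock : Bool) (h : Int) (item : List String) (j : Int) : Option Int :=
  (PySem.List.enumerate item).findSome? fun p =>
    if j < PySem.Str.len p.2 then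
      match PySem.Str.pyGet? p.2 j with
      | some c =>
          if (if lock then c ≠ '#' else c = '#') then
            some (if lock then p.1 - 1 else h - p.1)
          else none
      | none => none
    else none

-- B's heights list for one block: columns in ascending order, missing columns skipped
def d25B_heights (lock : Bool) (h : Int) (item : List String) : List Int :=
  let width := PySem.List.maxD (item.map PySem.Str.len) (fun x => x) 0
  (PySem.List.pyRange 0 width 1).filterMap (d25B_col lock h item)

def d25_parse_alt (input : String) : (List (List Int × Int)) × (List (List Int × Int)) × Int :=
  let blocks := pvBlocks input
  let h : Int := ((blocks.headD []).length : Int) - 1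
  let kl :=
    blocks.foldl
      (fun (kl : PySem.Dict (List Int) Int × PySem.Dict (List Int) Int) item =>
        let lock := PySem.Str.isIn "#" (item.headD "")   -- item[0]; Pre_ excludes item = []
        let t := d25B_heights lock h item
        if lock then (kl.1, kl.2.insert t (kl.2.getD t 0 + 1))
        else (kl.1.insert t (kl.1.getD t 0 + 1), kl.2))
      (PySem.Dict.empty, PySem.Dict.empty)
  (kl.1.items, kl.2.items, h)

-- ===== PRECONDITION & SPEC =====
-- Pre_ excludes exactly the inputs on which Python A raises IndexError (item[0] with some
-- "\n\n"-separated block empty, i.e. its splitlines = []); Python B raises there as well.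
def Pre_d25_parse (input : String) : Prop :=
  ∀ b ∈ (PySem.Str.split? input "\n\n").getD [], PySem.Str.splitlines b ≠ []
instance (input : String) : Decidable (Pre_d25_parse input) := by
  unfold Pre_d25_parse; infer_instance
def pvWitness_d25_parse : String := "#.\n##\n..\n\n..\n.#\n##"
def Spec_d25_parse (input : String) (out : (List (List Int × Int)) × (List (List Int × Int)) × Int) : Prop := out = d25_parse_alt input
instance (input : String) (out : (List (List Int × Int)) × (List (List Int × Int)) × Int) : Decidable (Spec_d25_parse input out) := by unfold Spec_d25_parse; infer_instance

-- ===== CLAIM (what is proved, stated in full; the proofs are below) =====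
def Claim_equal_d25_parse : Prop := ∀ (input : String), Dom_d25_parse input → Pre_d25_parse input → Spec_d25_parse input (d25_parse input)

-- ===== LEMMAS AND PROOFS =====

-- the value A writes and the per-character condition, per block kind
def pvVal (lock : Bool) (h i : Int) : Int := if lock then i - 1 else h - i

-- the row-hit function: what one row contributes at column j (B's inner-loop body)
def pvRowHit (lock : Bool) (h : Int) (j : Int) (p : Int × String) : Option Int :=
  if j < PySem.Str.len p.2 then
    match PySem.Str.pyGet? p.2 j with
    | some c =>
        if (if lock then c ≠ '#' else c = '#') then some (pvVal lock h p.1)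
        else none
    | none => none
  else none

theorem d25B_col_eq (lock : Bool) (h : Int) (item : List String) (j : Int) :
    d25B_col lock h item j = (PySem.List.enumerate item).findSome? (pvRowHit lock h j) := by
  rfl

theorem step_eq (lock : Bool) (h i : Int) (d : PySem.Dict Int Int) (p : Int × Char) :
    d25A_step lock h i d p =
      if (if lock then p.2 ≠ '#' else p.2 = '#') ∧ d.contains p.1 = false then
        d.insert p.1 (pvVal lock h i)
      else d := by
  cases lock <;> simp [d25A_step, pvVal]

theorem get?_none_of_contains_false {d : PySem.Dict Int Int} {k : Int}
    (hc : d.contains k = false) : d.get? k = none := by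
  rw [PySem.Dict.contains_eq_isSome_get?] at hc
  cases hq : d.get? k with
  | none => rfl
  | some w => rw [hq] at hc; simp at hc

theorem get?_isSome_of_contains_true {d : PySem.Dict Int Int} {k : Int}
    (hc : d.contains k = true) : ∃ w, d.get? k = some w := by
  rw [PySem.Dict.contains_eq_isSome_get?] at hc
  cases hq : d.get? k with
  | none => rw [hq] at hc; simp at hc
  | some w => exact ⟨w, rfl⟩

theorem findSome?_cons_or {α β : Type} (f : α → Option β) (a : α) (l : List α) :
    List.findSome? f (a :: l) = (f a).or (List.findSome? f l) := by
  cases hfa : f a <;> simp [hfa, Option.or]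

-- ---- inner (single row) characterization by lookup ----

theorem inner_keys_nodup (lock : Bool) (h i : Int) (cs : List (Int × Char))
    (d : PySem.Dict Int Int) (hd : d.keys.Nodup) :
    (cs.foldl (d25A_step lock h i) d).keys.Nodup := by
  induction cs generalizing d with
  | nil => exact hd
  | cons p cs ih =>
      refine ih _ ?_
      unfold d25A_step
      split_ifs <;> first
        | exact PySem.Dict.nodup_keys_insert _ _ _ hd
        | exact hd

theorem inner_get? (lock : Bool) (h i : Int) (cs : List Char) (s : Int)
    (d : PySem.Dict Int Int) (j : Int) :
    ((PySem.List.enumerate cs s).foldl (d25A_step lock h i) d).get? j =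
      (d.get? j).or ((PySem.List.enumerate cs s).findSome?
        (fun p => if p.1 = j ∧ (if lock then p.2 ≠ '#' else p.2 = '#') then
            some (pvVal lock h i) else none)) := by
  induction cs generalizing s d with
  | nil =>
      simp only [PySem.List.enumerate, List.foldl_nil, List.findSome?_nil]
      cases d.get? j <;> rfl
  | cons c cs ih =>
      rw [PySem.List.enumerate_cons, List.foldl_cons, findSome?_cons_or, ih, step_eq]
      by_cases hj : s = j
      · subst hj
        by_cases hhit : (if lock then c ≠ '#' else c = '#')
        · by_cases hcont : d.contains s = false
          · rw [if_pos ⟨hhit, hcont⟩]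
            rw [get?_none_of_contains_false hcont]
            have h1 : (d.insert s (pvVal lock h i)).get? s = some (pvVal lock h i) :=
              PySem.Dict.get?_insert_self d s (pvVal lock h i)
            rw [h1]
            simp [hhit, Option.or]
          · have hcont' : d.contains s = true := by
              cases hc : d.contains s
              · exact absurd hc hcont
              · rfl
            rw [if_neg (by intro hx; exact hcont hx.2)]
            obtain ⟨w, hw⟩ := get?_isSome_of_contains_true hcont'
            rw [hw]
            simp [Option.or]
        · rw [if_neg (by intro hx; exact hhit hx.1)]
          have : (if (s, c).1 = s ∧ (if lock then (s, c).2 ≠ '#' else (s, c).2 = '#') then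
              some (pvVal lock h i) else none) = none := by
            simp only [ite_eq_right_iff]
            intro hx; exact absurd hx.2 hhit
          rw [this]
          simp [Option.or]
      · have hhead : (if (s, c).1 = j ∧ (if lock then (s, c).2 ≠ '#' else (s, c).2 = '#') then
            some (pvVal lock h i) else none) = none := by
          simp only [ite_eq_right_iff]
          intro hx; exact absurd hx.1 hj
        rw [hhead]
        have hget : ∀ v, (if (if lock then c ≠ '#' else c = '#') ∧ d.contains s = false then
            d.insert s v else d).get? j = d.get? j := by
          intro v
          by_cases hcnd : ((if lock then c ≠ '#' else c = '#') ∧ d.contains s = false)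
          · rw [if_pos hcnd]
            exact PySem.Dict.get?_insert_of_ne d v (fun he => hj he.symm)
          · rw [if_neg hcnd]
        rw [hget]
        simp [Option.or]

-- ---- outer characterization: the full dict of one block, by lookup ----

theorem outer_keys_nodup (lock : Bool) (h : Int) (rows : List (Int × String))
    (d : PySem.Dict Int Int) (hd : d.keys.Nodup) :
    (rows.foldl
        (fun d q => (PySem.List.enumerate q.2.toList).foldl (d25A_step lock h q.1) d)
        d).keys.Nodup := by
  induction rows generalizing d with
  | nil => exact hd
  | cons q rows ih => exact ih _ (inner_keys_nodup lock h q.1 _ d hd)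

def pvRowFind (lock : Bool) (h : Int) (j : Int) (q : Int × String) : Option Int :=
  (PySem.List.enumerate q.2.toList).findSome?
    (fun p => if p.1 = j ∧ (if lock then p.2 ≠ '#' else p.2 = '#') then
        some (pvVal lock h q.1) else none)

theorem outer_get? (lock : Bool) (h : Int) (rows : List (Int × String))
    (d : PySem.Dict Int Int) (j : Int) :
    (rows.foldl
        (fun d q => (PySem.List.enumerate q.2.toList).foldl (d25A_step lock h q.1) d)
        d).get? j =
      (d.get? j).or (rows.findSome? (pvRowFind lock h j)) := by
  induction rows generalizing d with
  | nil =>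
      simp only [List.foldl_nil, List.findSome?_nil]
      cases d.get? j <;> rfl
  | cons q rows ih =>
      rw [List.foldl_cons, findSome?_cons_or, ih, inner_get?, Option.or_assoc]
      rfl

-- one row's scan: the enumerate-based search equals the direct index lookup
theorem rowscan_eq (j : Int) (P : Char → Prop) [DecidablePred P] (g : Int)
    (cs : List Char) (s : Int) :
    (PySem.List.enumerate cs s).findSome?
        (fun p => if p.1 = j ∧ P p.2 then some g else none) =
      if s ≤ j then
        (match cs[(j - s).toNat]? with
          | some c => if P c then some g else none
          | none => none)
      else none := by
  induction cs generalizing s with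
  | nil =>
      simp only [PySem.List.enumerate, List.findSome?_nil, List.getElem?_nil]
      split_ifs <;> rfl
  | cons c cs ih =>
      rw [PySem.List.enumerate_cons, findSome?_cons_or, ih]
      by_cases hsj : s ≤ j
      · by_cases hje : j = s
        · subst hje
          have h0 : (j - j).toNat = 0 := by omega
          have hns : ¬ (j + 1 ≤ j) := by omega
          rw [if_neg hns, if_pos hsj, h0]
          simp only [List.getElem?_cons_zero]
          by_cases hP : P c <;> simp [hP, Option.or]
        · have hlt : s + 1 ≤ j := by omega
          have hhead : (if (s, c).1 = j ∧ P (s, c).2 then some g else none) = none := by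
            simp only [ite_eq_right_iff]; intro hx; exact absurd hx.1.symm hje
          rw [hhead, if_pos hlt, if_pos hsj]
          have hidx : (j - s).toNat = (j - (s + 1)).toNat + 1 := by omega
          rw [hidx]
          simp [Option.or]
      · have hns : ¬ (s + 1 ≤ j) := by omega
        have hhead : (if (s, c).1 = j ∧ P (s, c).2 then some g else none) = none := by
          simp only [ite_eq_right_iff]
          intro hx
          exact absurd hx.1 (by intro he; exact hsj (le_of_eq he))
        rw [hhead, if_neg hns, if_neg hsj]
        simp [Option.or]

theorem rowFind_eq_rowHit (lock : Bool) (h : Int) (j : Int) (hj : 0 ≤ j)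
    (q : Int × String) : pvRowFind lock h j q = pvRowHit lock h j q := by
  unfold pvRowFind pvRowHit
  rw [rowscan_eq j (fun c => (if lock then c ≠ '#' else c = '#')) (pvVal lock h q.1)
    q.2.toList 0, if_pos hj]
  by_cases hlt : j < PySem.Str.len q.2
  · rw [if_pos hlt]
    have hjj : j = ((j.toNat : Nat) : Int) := (Int.toNat_of_nonneg hj).symm
    have hget : PySem.Str.pyGet? q.2 j = q.2.toList[j.toNat]? := by
      rw [PySem.Str.pyGet?_eq, PySem.Chars.pyGet?_eq_listPyGet?, hjj,
        PySem.List.pyGet?_natCast]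
      have hnn : ((j.toNat : Int)).toNat = j.toNat := by omega
      rw [hnn]
    rw [hget]
    have hsub : (j - 0).toNat = j.toNat := by omega
    rw [hsub]
  · rw [if_neg hlt]
    have hnone : q.2.toList[(j - 0).toNat]? = none := by
      apply List.getElem?_eq_none
      have : (PySem.Str.len q.2) = (q.2.toList.length : Int) := rfl
      omega
    rw [hnone]

theorem rowFind_neg (lock : Bool) (h : Int) (j : Int) (hj : j < 0)
    (q : Int × String) : pvRowFind lock h j q = none := by
  unfold pvRowFind
  rw [rowscan_eq j (fun c => (if lock then c ≠ '#' else c = '#')) (pvVal lock h q.1)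
    q.2.toList 0, if_neg (by omega)]

theorem heights_keys_nodup (lock : Bool) (h : Int) (item : List String) :
    (d25A_heights lock h item).keys.Nodup :=
  outer_keys_nodup lock h _ _ PySem.Dict.nodup_keys_empty

theorem heights_get? (lock : Bool) (h : Int) (item : List String) (j : Int) :
    (d25A_heights lock h item).get? j =
      if 0 ≤ j then d25B_col lock h item j else none := by
  unfold d25A_heights
  rw [outer_get?, PySem.Dict.get?_empty]
  by_cases hj : 0 ≤ j
  · rw [if_pos hj, d25B_col_eq]
    have : (PySem.List.enumerate item).findSome? (pvRowFind lock h j) =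
        (PySem.List.enumerate item).findSome? (pvRowHit lock h j) := by
      congr 1
      funext q
      exact rowFind_eq_rowHit lock h j hj q
    rw [this]
    simp [Option.or]
  · rw [if_neg hj]
    have : (PySem.List.enumerate item).findSome? (pvRowFind lock h j) = none := by
      rw [List.findSome?_eq_none_iff]
      intro q _
      exact rowFind_neg lock h j (by omega) q
    rw [this]
    simp [Option.or]

theorem heights_mem (lock : Bool) (h : Int) (item : List String) (j v : Int) :
    (j, v) ∈ (d25A_heights lock h item).items ↔
      0 ≤ j ∧ d25B_col lock h item j = some v := by
  rw [← PySem.Dict.get?_eq_some_iff_mem_items _ _ _ (heights_keys_nodup lock h item),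
    heights_get?]
  by_cases hj : 0 ≤ j
  · simp [hj]
  · simp [hj]

theorem col_lt_width (lock : Bool) (h : Int) (item : List String) (j v : Int)
    (hc : d25B_col lock h item j = some v) :
    j < PySem.List.maxD (item.map PySem.Str.len) (fun x => x) 0 := by
  rw [d25B_col_eq] at hc
  obtain ⟨p, hp, hhit⟩ := List.exists_of_findSome?_eq_some hc
  have hlen : j < PySem.Str.len p.2 := by
    unfold pvRowHit at hhit
    by_cases hx : j < PySem.Str.len p.2
    · exact hx
    · rw [if_neg hx] at hhit; exact absurd hhit (by simp)
  have hmem : PySem.Str.len p.2 ∈ item.map PySem.Str.len := by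
    rw [PySem.List.mem_enumerate_iff] at hp
    obtain ⟨k, hk, hpk⟩ := hp
    subst hpk
    exact List.mem_map_of_mem (by exact List.getElem_mem hk)
  obtain ⟨m, hm⟩ : ∃ m, PySem.List.max? (item.map PySem.Str.len) (fun x => x) = some m := by
    have hne : item.map PySem.Str.len ≠ [] := by
      intro he; rw [he] at hmem; exact absurd hmem (List.not_mem_nil)
    cases hxs : item.map PySem.Str.len with
    | nil => exact absurd hxs hne
    | cons x t =>
        unfold PySem.List.max?
        rw [List.foldl_cons]
        clear hxs hmem hne
        induction t generalizing x with
        | nil => exact ⟨x, rfl⟩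
        | cons y t ih =>
            rw [List.foldl_cons]
            by_cases hxy : x < y
            · simpa [hxy] using ih y
            · simpa [hxy] using ih x
  have hle := PySem.List.max?_isMax hm _ hmem
  unfold PySem.List.maxD
  rw [hm]
  calc j < PySem.Str.len p.2 := hlen
    _ ≤ m := hle

-- ---- pyRange 0 w 1: membership and strict increase ----

theorem mem_pyRange01 (w j : Int) : j ∈ PySem.List.pyRange 0 w 1 ↔ 0 ≤ j ∧ j < w := by
  simp only [PySem.List.pyRange, if_neg (one_ne_zero), List.mem_map, List.mem_range]
  constructor
  · rintro ⟨k, hk, rfl⟩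
    split_ifs at hk
    all_goals (try simp only [Int.ediv_one] at hk)
    all_goals omega
  · rintro ⟨h0, hjw⟩
    refine ⟨j.toNat, ?_, by omega⟩
    have hw : (0:Int) < w := by omega
    rw [if_pos one_pos, if_pos hw]
    simp only [Int.ediv_one]
    omega

theorem pairwise_pyRange01 (w : Int) :
    (PySem.List.pyRange 0 w 1).Pairwise (· < ·) := by
  simp only [PySem.List.pyRange, if_neg (one_ne_zero)]
  rw [List.pairwise_map]
  exact (List.pairwise_lt_range).imp (by intro a b hab; omega)

-- ---- sorted2 with distinct first components = sorted by the first component ----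

theorem insertBy_congr {α : Type} (p q : α → α → Bool) (x : α) (acc : List α)
    (hpq : ∀ y ∈ acc, p x y = q x y) :
    PySem.List.insertBy p x acc = PySem.List.insertBy q x acc := by
  induction acc with
  | nil => rfl
  | cons y ys ih =>
      simp only [PySem.List.insertBy]
      rw [hpq y (by simp)]
      split_ifs with hq
      · rfl
      · rw [ih (fun z hz => hpq z (by simp [hz]))]

theorem foldl_insertBy_congr {α : Type} (p q : α → α → Bool) (S : List α)
    (hagree : ∀ a ∈ S, ∀ b ∈ S, p a b = q a b) :
    ∀ (l acc : List α), (∀ a ∈ l, a ∈ S) → (∀ b ∈ acc, b ∈ S) →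
      l.foldl (fun acc x => PySem.List.insertBy p x acc) acc =
        l.foldl (fun acc x => PySem.List.insertBy q x acc) acc := by
  intro l
  induction l with
  | nil => intro acc _ _; rfl
  | cons x t ih =>
      intro acc hl hacc
      rw [List.foldl_cons, List.foldl_cons]
      have hx : x ∈ S := hl x (by simp)
      rw [insertBy_congr p q x acc (fun y hy => hagree x hx y (hacc y hy))]
      refine ih _ (fun a ha => hl a (by simp [ha])) ?_
      intro b hb
      rw [PySem.List.mem_insertBy] at hb
      rcases hb with rfl | hb
      · exact hx
      · exact hacc b hb

theorem sorted2_eq_sorted_fst (xs : List (Int × Int))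
    (hnd : (xs.map Prod.fst).Nodup) :
    PySem.List.sorted2 xs Prod.fst Prod.snd = PySem.List.sorted xs Prod.fst := by
  simp only [PySem.List.sorted2, PySem.List.sorted, Bool.false_eq_true, reduceIte]
  apply foldl_insertBy_congr _ _ xs _ xs [] (fun a ha => ha) (by simp)
  intro a ha b hb
  rcases lt_trichotomy a.1 b.1 with hlt | heq | hgt
  · simp [hlt, not_lt_of_gt hlt]
  · have hab : a = b := List.inj_on_of_nodup_map hnd ha hb heq
    subst hab
    simp
  · simp [hgt, not_lt_of_gt hgt]

-- ---- the per-block tuples agree ----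

theorem tuple_eq (lock : Bool) (h : Int) (item : List String) :
    d25A_tuple lock h item = d25B_heights lock h item := by
  unfold d25A_tuple d25B_heights
  set width := PySem.List.maxD (item.map PySem.Str.len) (fun x => x) 0 with hwidth
  set P : List (Int × Int) :=
    (PySem.List.pyRange 0 width 1).filterMap
      (fun j => (d25B_col lock h item j).map (fun v => (j, v))) with hP
  have hPpair : P.Pairwise (fun a b => a.1 < b.1) := by
    rw [hP, List.pairwise_filterMap]
    refine (pairwise_pyRange01 width).imp ?_
    intro j j' hjj b hb b' hb'
    have h1 : b.1 = j := by
      cases hc : d25B_col lock h item j <;> rw [hc] at hb <;> simp at hb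
      rw [← hb]
    have h2 : b'.1 = j' := by
      cases hc : d25B_col lock h item j' <;> rw [hc] at hb' <;> simp at hb'
      rw [← hb']
    rw [h1, h2]; exact hjj
  have hPmem : ∀ j v, (j, v) ∈ P ↔ (0 ≤ j ∧ j < width) ∧ d25B_col lock h item j = some v := by
    intro j v
    rw [hP, List.mem_filterMap]
    constructor
    · rintro ⟨j', hj', hsome⟩
      cases hc : d25B_col lock h item j' <;> rw [hc] at hsome <;> simp at hsome
      obtain ⟨he1, he2⟩ := hsome
      subst he1
      rw [mem_pyRange01] at hj'
      exact ⟨hj', by rw [hc, he2]⟩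
    · rintro ⟨hjr, hc⟩
      exact ⟨j, (mem_pyRange01 width j).mpr hjr, by rw [hc]; rfl⟩
  have hDnodup : (d25A_heights lock h item).items.Nodup :=
    (heights_keys_nodup lock h item).of_map
  have hPnodup : P.Nodup :=
    hPpair.imp (fun {a b} hab => by intro he; rw [he] at hab; exact lt_irrefl _ hab)
  have hperm : P.Perm (d25A_heights lock h item).items := by
    rw [List.perm_ext_iff_of_nodup hPnodup hDnodup]
    intro a
    obtain ⟨j, v⟩ := a
    rw [hPmem, heights_mem]
    constructor
    · rintro ⟨hjr, hc⟩; exact ⟨hjr.1, hc⟩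
    · rintro ⟨hj0, hc⟩
      exact ⟨⟨hj0, col_lt_width lock h item j v hc⟩, hc⟩
  have hkeysnd : ((d25A_heights lock h item).items.map Prod.fst).Nodup :=
    heights_keys_nodup lock h item
  rw [sorted2_eq_sorted_fst _ hkeysnd,
    PySem.List.sorted_eq_of_perm_of_pairwise_lt _ P Prod.fst hperm hPpair]
  rw [hP, List.map_filterMap]
  congr 1
  funext j
  cases hc : d25B_col lock h item j <;> simp

-- ===== VERDICT (by name: the statement is the Claim_ definition above) =====
theorem d25_parse_spec : Claim_equal_d25_parse := by
  intro input _ _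
  unfold Spec_d25_parse
  simp only [d25_parse, d25_parse_alt, tuple_eq]
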